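-- pv_equiv track=rewrite | github.com/IAmSoThirsty/Project-AI | src/features/sovereign_messaging.py | validate_communication_code
-- ===== SOURCE A (Python) =====
-- import string
--
-- def validate_communication_code(code: str) -> bool:
--     """
--     Validate communication code format.
--
--     Args:
--         code: Communication code to validate
--
--     Returns:
--         True if valid format, False otherwise
--     """
--     # Check format: XXXX-XXXX-XXXX-XXXX
--     parts = code.split("-")
--     if len(parts) != 4:
--         return False
--
--     # Each part should be 4 alphanumeric characters
--     chars = string.ascii_uppercase + string.digits
--     for part in parts:
--         if len(part) != 4:
--             return False
--         if not all(c in chars for c in part):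
--             return False
--
--     return True
-- ===== SOURCE B (Python) =====
-- def validate_communication_code(code: str) -> bool:
--     """Single left-to-right pass over the 19 characters by position (no split)."""
--     if len(code) != 19:
--         return False
--     for i, c in enumerate(code):
--         if i % 5 == 4:
--             if c != "-":
--                 return False
--         elif not ("0" <= c <= "9" or "A" <= c <= "Z"):
--             return False
--     return True
-- ===== Notes on version B (the rewrite author's own statement) =====
-- stated objective: simpler
-- what changed: A splits the code on the dash separator and then checks each of the four parts with an inner membership scan over a 36-character alphabet string; B does no splitting at all: it requires length 19 and makes a single indexed pass, demanding a dash wherever the index is congruent to 4 mod 5 and a character in the 0-9 or A-Z range elsewhere.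
import Mathlib
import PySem

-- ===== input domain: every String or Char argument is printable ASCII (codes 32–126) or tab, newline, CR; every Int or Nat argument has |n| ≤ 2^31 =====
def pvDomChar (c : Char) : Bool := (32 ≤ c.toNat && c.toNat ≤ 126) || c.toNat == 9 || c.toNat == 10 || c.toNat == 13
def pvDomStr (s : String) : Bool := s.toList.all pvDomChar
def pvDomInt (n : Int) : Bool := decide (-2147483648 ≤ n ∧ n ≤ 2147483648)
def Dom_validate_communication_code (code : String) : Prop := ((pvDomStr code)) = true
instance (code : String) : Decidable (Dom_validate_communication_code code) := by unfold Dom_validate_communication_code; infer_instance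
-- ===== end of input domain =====

-- B replaces A's split-on-'-'-then-check-each-part pass by a single positional scan over the 19 characters; objective: simpler.

-- ===== PORT A =====
-- parts = code.split("-"); len(parts) == 4; each part 4 chars, all in A-Z0-9
def validate_communication_code (code : String) : Bool :=
  let parts := PySem.Chars.splitOn code.toList ("-".toList)
  if parts.length ≠ 4 then false
  else
    let chars := "ABCDEFGHIJKLMNOPQRSTUVWXYZ0123456789".toList
    parts.all fun part =>
      if part.length ≠ 4 then false
      else part.all fun c => chars.contains c

-- ===== PORT B =====
-- len(code) == 19 and a single enumerate pass: dash at i % 5 == 4, else '0'..'9' or 'A'..'Z'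
def validate_communication_code_alt (code : String) : Bool :=
  let cs := code.toList
  if cs.length ≠ 19 then false
  else
    (PySem.List.enumerate cs 0).all fun ic =>
      if PySem.Int.mod ic.1 5 == 4 then ic.2 == '-'
      else ('0' ≤ ic.2 && ic.2 ≤ '9') || ('A' ≤ ic.2 && ic.2 ≤ 'Z')

-- ===== PRECONDITION & SPEC =====
def Spec_validate_communication_code (code : String) (out : Bool) : Prop := out = validate_communication_code_alt code
instance (code : String) (out : Bool) : Decidable (Spec_validate_communication_code code out) := by unfold Spec_validate_communication_code; infer_instance

-- ===== CLAIM (what is proved, stated in full; the proofs are below) =====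
def Claim_equal_validate_communication_code : Prop := ∀ (code : String), Dom_validate_communication_code code → Spec_validate_communication_code code (validate_communication_code code)

-- ===== LEMMAS AND PROOFS =====

-- B's per-character class test, as a named predicate for the proofs
def okc (c : Char) : Bool := ('0' ≤ c && c ≤ '9') || ('A' ≤ c && c ≤ 'Z')

lemma contains_iff (c : Char) :
    ("ABCDEFGHIJKLMNOPQRSTUVWXYZ0123456789".toList).contains c = okc c := by
  show (['A','B','C','D','E','F','G','H','I','J','K','L','M','N','O','P','Q','R','S','T','U','V','W','X','Y','Z','0','1','2','3','4','5','6','7','8','9'] : List Char).contains c = okc c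
  rw [Bool.eq_iff_iff]
  simp [okc, List.contains_eq_mem, Char.le_def, Char.ext_iff, UInt32.le_iff_toNat_le, UInt32.ext_iff]
  omega

-- a simple accumulator-free split on '-' used to reason about PySem.Chars.splitOn
def mySplit : List Char → List (List Char)
  | [] => [[]]
  | c :: cs =>
    if c = '-' then [] :: mySplit cs
    else
      match mySplit cs with
      | [] => [[c]]
      | p :: ps => (c :: p) :: ps

lemma mySplit_ne_nil (cs : List Char) : mySplit cs ≠ [] := by
  cases cs with
  | nil => simp [mySplit]
  | cons c cs => simp only [mySplit]; split_ifs; · simp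
                 · cases mySplit cs <;> simp

lemma go_spec : ∀ (fuel : Nat) (l cur : List Char) (acc : List (List Char)),
    l.length ≤ fuel →
    PySem.Chars.splitOn.go ['-'] fuel l cur acc =
      acc.reverse ++ (match mySplit l with
        | [] => [cur.reverse]
        | p :: ps => (cur.reverse ++ p) :: ps) := by
  intro fuel
  induction fuel with
  | zero =>
    intro l cur acc h
    have : l = [] := List.length_eq_zero_iff.mp (Nat.le_zero.mp h)
    subst this
    simp [PySem.Chars.splitOn.go, mySplit]
  | succ n ih =>
    intro l cur acc h
    cases l with
    | nil => simp [PySem.Chars.splitOn.go, mySplit]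
    | cons c rest =>
      by_cases hc : c = '-'
      · subst hc
        rw [show PySem.Chars.splitOn.go ['-'] (n+1) ('-' :: rest) cur acc
              = PySem.Chars.splitOn.go ['-'] n rest [] (cur.reverse :: acc) by
            simp [PySem.Chars.splitOn.go, List.isPrefixOf]]
        rw [ih rest [] (cur.reverse :: acc) (by simpa using Nat.le_of_succ_le_succ (by simpa using h))]
        cases hms : mySplit rest with
        | nil => exact absurd hms (mySplit_ne_nil rest)
        | cons p ps => simp [mySplit, hms]
      · rw [show PySem.Chars.splitOn.go ['-'] (n+1) (c :: rest) cur acc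
              = PySem.Chars.splitOn.go ['-'] n rest (c :: cur) acc by
            simp [PySem.Chars.splitOn.go, List.isPrefixOf, Ne.symm hc]]
        rw [ih rest (c :: cur) acc (by simpa using Nat.le_of_succ_le_succ (by simpa using h))]
        simp only [mySplit, if_neg hc]
        cases hms : mySplit rest with
        | nil => exact absurd hms (mySplit_ne_nil rest)
        | cons p ps => simp

lemma splitOn_eq_mySplit (cs : List Char) : PySem.Chars.splitOn cs ['-'] = mySplit cs := by
  rw [PySem.Chars.splitOn, go_spec (cs.length+1) cs [] [] (by omega)]
  cases hms : mySplit cs with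
  | nil => exact absurd hms (mySplit_ne_nil cs)
  | cons p ps => simp

lemma mySplit_no_dash (p : List Char) (h : '-' ∉ p) : mySplit p = [p] := by
  induction p with
  | nil => rfl
  | cons c cs ih =>
    have hc : c ≠ '-' := by intro e; exact h (e ▸ List.mem_cons_self)
    have : mySplit cs = [cs] := ih (fun hm => h (List.mem_cons_of_mem _ hm))
    simp [mySplit, hc, this]

lemma mySplit_append (p rest : List Char) (h : '-' ∉ p) :
    mySplit (p ++ '-' :: rest) = p :: mySplit rest := by
  induction p with
  | nil => simp [mySplit]
  | cons c cs ih =>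
    have hc : c ≠ '-' := by intro e; exact h (e ▸ List.mem_cons_self)
    have := ih (fun hm => h (List.mem_cons_of_mem _ hm))
    simp [mySplit, hc, this]

-- joining mySplit's pieces with '-' gives back the input
def interDash : List (List Char) → List Char
  | [] => []
  | [p] => p
  | p :: ps => p ++ '-' :: interDash ps

lemma mySplit_join (cs : List Char) : interDash (mySplit cs) = cs := by
  induction cs with
  | nil => rfl
  | cons c cs ih =>
    by_cases hc : c = '-'
    · subst hc
      simp only [mySplit, if_true]
      cases hms : mySplit cs with
      | nil => exact absurd hms (mySplit_ne_nil cs)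
      | cons p ps => rw [hms] at ih; simpa [interDash] using ih
    · simp only [mySplit, if_neg hc]
      cases hms : mySplit cs with
      | nil => exact absurd hms (mySplit_ne_nil cs)
      | cons p ps =>
        rw [hms] at ih
        cases ps with
        | nil => simpa [interDash] using congrArg (c :: ·) ih
        | cons q qs => simpa [interDash] using congrArg (c :: ·) ih

-- the canonical shape both programs test for
def OKpart (p : List Char) : Prop := p.length = 4 ∧ ∀ c ∈ p, okc c = true

def Canon (cs : List Char) : Prop :=
  ∃ p1 p2 p3 p4, cs = p1 ++ '-' :: (p2 ++ '-' :: (p3 ++ '-' :: p4)) ∧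
    OKpart p1 ∧ OKpart p2 ∧ OKpart p3 ∧ OKpart p4

lemma okc_ne_dash {c : Char} (h : okc c = true) : c ≠ '-' := by
  intro e; subst e; simp [okc] at h

lemma not_dash_mem {p : List Char} (h : ∀ c ∈ p, okc c = true) : '-' ∉ p := by
  intro hm; exact okc_ne_dash (h _ hm) rfl

lemma A_iff (code : String) : validate_communication_code code = true ↔ Canon code.toList := by
  have hA : validate_communication_code code =
      (if (mySplit code.toList).length ≠ 4 then false
       else (mySplit code.toList).all fun part =>
         if part.length ≠ 4 then false
         else part.all fun c => ("ABCDEFGHIJKLMNOPQRSTUVWXYZ0123456789".toList).contains c) := by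
    unfold validate_communication_code
    rw [show ("-".toList) = ['-'] from rfl, splitOn_eq_mySplit]
  rw [hA]
  constructor
  · intro h
    split_ifs at h with hlen
    push_neg at hlen
    obtain ⟨p1, p2, p3, p4, hms⟩ : ∃ p1 p2 p3 p4, mySplit code.toList = [p1, p2, p3, p4] := by
      rcases hp : mySplit code.toList with _ | ⟨p1, _ | ⟨p2, _ | ⟨p3, _ | ⟨p4, _ | _⟩⟩⟩⟩ <;>
        simp [hp] at hlen ⊢
    rw [hms] at h
    simp only [List.all_cons, List.all_nil, Bool.and_eq_true] at h
    have hOK : ∀ p ∈ [p1,p2,p3,p4],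
        (if p.length ≠ 4 then false else p.all fun c => ("ABCDEFGHIJKLMNOPQRSTUVWXYZ0123456789".toList).contains c) = true →
        OKpart p := by
      intro p _ hp
      split_ifs at hp with h4
      push_neg at h4
      refine ⟨h4, fun c hc => ?_⟩
      rw [← contains_iff]
      exact List.all_eq_true.mp hp c hc
    refine ⟨p1, p2, p3, p4, ?_, hOK p1 (by simp) h.1, hOK p2 (by simp) h.2.1,
      hOK p3 (by simp) h.2.2.1, hOK p4 (by simp) h.2.2.2.1⟩
    have := mySplit_join code.toList
    rw [hms] at this
    simpa [interDash] using this.symm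
  · rintro ⟨p1, p2, p3, p4, hcs, h1, h2, h3, h4⟩
    rw [hcs, mySplit_append _ _ (not_dash_mem h1.2), mySplit_append _ _ (not_dash_mem h2.2),
      mySplit_append _ _ (not_dash_mem h3.2), mySplit_no_dash _ (not_dash_mem h4.2)]
    have hall : ∀ p, OKpart p →
        (if p.length ≠ 4 then false else p.all fun c => ("ABCDEFGHIJKLMNOPQRSTUVWXYZ0123456789".toList).contains c) = true := by
      intro p hp
      rw [if_neg (not_not_intro hp.1)]
      exact List.all_eq_true.mpr fun c hc => (contains_iff c).symm ▸ hp.2 c hc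
    rw [if_neg (by simp)]
    simp only [List.all_cons, List.all_nil, Bool.and_eq_true]
    exact ⟨hall p1 h1, hall p2 h2, hall p3 h3, hall p4 h4, trivial⟩

-- the value of i % 5 == 4 at each of the 19 literal positions
lemma pm0 : ¬ (PySem.Int.mod 0 5 = (4:Int)) := by decide
lemma pm1 : ¬ (PySem.Int.mod 1 5 = (4:Int)) := by decide
lemma pm2 : ¬ (PySem.Int.mod 2 5 = (4:Int)) := by decide
lemma pm3 : ¬ (PySem.Int.mod 3 5 = (4:Int)) := by decide
lemma pm4 : PySem.Int.mod 4 5 = (4:Int) := by decide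
lemma pm5 : ¬ (PySem.Int.mod 5 5 = (4:Int)) := by decide
lemma pm6 : ¬ (PySem.Int.mod 6 5 = (4:Int)) := by decide
lemma pm7 : ¬ (PySem.Int.mod 7 5 = (4:Int)) := by decide
lemma pm8 : ¬ (PySem.Int.mod 8 5 = (4:Int)) := by decide
lemma pm9 : PySem.Int.mod 9 5 = (4:Int) := by decide
lemma pm10 : ¬ (PySem.Int.mod 10 5 = (4:Int)) := by decide
lemma pm11 : ¬ (PySem.Int.mod 11 5 = (4:Int)) := by decide
lemma pm12 : ¬ (PySem.Int.mod 12 5 = (4:Int)) := by decide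
lemma pm13 : ¬ (PySem.Int.mod 13 5 = (4:Int)) := by decide
lemma pm14 : PySem.Int.mod 14 5 = (4:Int) := by decide
lemma pm15 : ¬ (PySem.Int.mod 15 5 = (4:Int)) := by decide
lemma pm16 : ¬ (PySem.Int.mod 16 5 = (4:Int)) := by decide
lemma pm17 : ¬ (PySem.Int.mod 17 5 = (4:Int)) := by decide
lemma pm18 : ¬ (PySem.Int.mod 18 5 = (4:Int)) := by decide

set_option maxHeartbeats 1600000 in
lemma B_iff (code : String) : validate_communication_code_alt code = true ↔ Canon code.toList := by
  have hB : validate_communication_code_alt code =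
      (if code.toList.length ≠ 19 then false
       else (PySem.List.enumerate code.toList 0).all fun ic =>
         if PySem.Int.mod ic.1 5 == 4 then ic.2 == '-'
         else ('0' ≤ ic.2 && ic.2 ≤ '9') || ('A' ≤ ic.2 && ic.2 ≤ 'Z')) := rfl
  have okc_eq : ∀ c : Char, (('0' ≤ c && c ≤ '9') || ('A' ≤ c && c ≤ 'Z')) = okc c := fun _ => rfl
  rw [hB]
  constructor
  · intro h
    have hlen : code.toList.length = 19 := by
      by_contra hne
      rw [if_pos hne] at h
      exact Bool.false_ne_true h
    rw [if_neg (not_not_intro hlen)] at h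
    generalize hg : code.toList = cs at hlen h ⊢
    rcases cs with _ | ⟨c0, cs⟩; · simp at hlen
    rcases cs with _ | ⟨c1, cs⟩; · simp at hlen
    rcases cs with _ | ⟨c2, cs⟩; · simp at hlen
    rcases cs with _ | ⟨c3, cs⟩; · simp at hlen
    rcases cs with _ | ⟨c4, cs⟩; · simp at hlen
    rcases cs with _ | ⟨c5, cs⟩; · simp at hlen
    rcases cs with _ | ⟨c6, cs⟩; · simp at hlen
    rcases cs with _ | ⟨c7, cs⟩; · simp at hlen
    rcases cs with _ | ⟨c8, cs⟩; · simp at hlen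
    rcases cs with _ | ⟨c9, cs⟩; · simp at hlen
    rcases cs with _ | ⟨c10, cs⟩; · simp at hlen
    rcases cs with _ | ⟨c11, cs⟩; · simp at hlen
    rcases cs with _ | ⟨c12, cs⟩; · simp at hlen
    rcases cs with _ | ⟨c13, cs⟩; · simp at hlen
    rcases cs with _ | ⟨c14, cs⟩; · simp at hlen
    rcases cs with _ | ⟨c15, cs⟩; · simp at hlen
    rcases cs with _ | ⟨c16, cs⟩; · simp at hlen
    rcases cs with _ | ⟨c17, cs⟩; · simp at hlen
    rcases cs with _ | ⟨c18, cs⟩; · simp at hlen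
    have hl0 : cs.length = 0 := by simp only [List.length_cons] at hlen; omega
    obtain rfl := List.length_eq_zero_iff.mp hl0
    simp only [okc_eq] at h
    simp only [PySem.List.enumerate_cons, PySem.List.enumerate_nil, List.all_cons, List.all_nil,
      Int.reduceAdd, beq_iff_eq, pm0, pm1, pm2, pm3, pm4, pm5, pm6, pm7, pm8, pm9, pm10, pm11, pm12, pm13, pm14, pm15, pm16, pm17, pm18, if_false, if_true,
      Bool.and_eq_true, and_true] at h
    obtain ⟨h0, h1, h2, h3, hd4, h5, h6, h7, h8, hd9, h10, h11, h12, h13, hd14, h15, h16, h17, h18⟩ := h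
    exact ⟨[c0,c1,c2,c3], [c5,c6,c7,c8], [c10,c11,c12,c13], [c15,c16,c17,c18],
      by simp [hd4, hd9, hd14],
      ⟨rfl, by intro x hx; simp only [List.mem_cons, List.not_mem_nil, or_false] at hx; rcases hx with rfl|rfl|rfl|rfl <;> assumption⟩,
      ⟨rfl, by intro x hx; simp only [List.mem_cons, List.not_mem_nil, or_false] at hx; rcases hx with rfl|rfl|rfl|rfl <;> assumption⟩,
      ⟨rfl, by intro x hx; simp only [List.mem_cons, List.not_mem_nil, or_false] at hx; rcases hx with rfl|rfl|rfl|rfl <;> assumption⟩,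
      ⟨rfl, by intro x hx; simp only [List.mem_cons, List.not_mem_nil, or_false] at hx; rcases hx with rfl|rfl|rfl|rfl <;> assumption⟩⟩
  · rintro ⟨p1, p2, p3, p4, hcs, hp1, hp2, hp3, hp4⟩
    obtain ⟨l1, o1⟩ := hp1
    obtain ⟨l2, o2⟩ := hp2
    obtain ⟨l3, o3⟩ := hp3
    obtain ⟨l4, o4⟩ := hp4
    rcases p1 with _ | ⟨a0, _ | ⟨a1, _ | ⟨a2, _ | ⟨a3, _ | _⟩⟩⟩⟩ <;> simp at l1
    rcases p2 with _ | ⟨b0, _ | ⟨b1, _ | ⟨b2, _ | ⟨b3, _ | _⟩⟩⟩⟩ <;> simp at l2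
    rcases p3 with _ | ⟨d0, _ | ⟨d1, _ | ⟨d2, _ | ⟨d3, _ | _⟩⟩⟩⟩ <;> simp at l3
    rcases p4 with _ | ⟨e0, _ | ⟨e1, _ | ⟨e2, _ | ⟨e3, _ | _⟩⟩⟩⟩ <;> simp at l4
    rw [hcs]
    simp only [List.cons_append, List.nil_append]
    rw [if_neg (by simp)]
    have o10 := o1 _ (by simp : a0 ∈ [a0,a1,a2,a3])
    have o11 := o1 _ (by simp : a1 ∈ [a0,a1,a2,a3])
    have o12 := o1 _ (by simp : a2 ∈ [a0,a1,a2,a3])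
    have o13 := o1 _ (by simp : a3 ∈ [a0,a1,a2,a3])
    have o20 := o2 _ (by simp : b0 ∈ [b0,b1,b2,b3])
    have o21 := o2 _ (by simp : b1 ∈ [b0,b1,b2,b3])
    have o22 := o2 _ (by simp : b2 ∈ [b0,b1,b2,b3])
    have o23 := o2 _ (by simp : b3 ∈ [b0,b1,b2,b3])
    have o30 := o3 _ (by simp : d0 ∈ [d0,d1,d2,d3])
    have o31 := o3 _ (by simp : d1 ∈ [d0,d1,d2,d3])
    have o32 := o3 _ (by simp : d2 ∈ [d0,d1,d2,d3])
    have o33 := o3 _ (by simp : d3 ∈ [d0,d1,d2,d3])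
    have o40 := o4 _ (by simp : e0 ∈ [e0,e1,e2,e3])
    have o41 := o4 _ (by simp : e1 ∈ [e0,e1,e2,e3])
    have o42 := o4 _ (by simp : e2 ∈ [e0,e1,e2,e3])
    have o43 := o4 _ (by simp : e3 ∈ [e0,e1,e2,e3])
    simp only [okc_eq]
    simp only [PySem.List.enumerate_cons, PySem.List.enumerate_nil, List.all_cons, List.all_nil,
      Int.reduceAdd, beq_iff_eq, pm0, pm1, pm2, pm3, pm4, pm5, pm6, pm7, pm8, pm9, pm10, pm11, pm12, pm13, pm14, pm15, pm16, pm17, pm18, if_false, if_true,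
      Bool.and_eq_true, and_true]
    exact ⟨o10, o11, o12, o13, trivial, o20, o21, o22, o23, trivial, o30, o31, o32, o33, trivial, o40, o41, o42, o43⟩

-- ===== VERDICT (by name: the statement is the Claim_ definition above) =====
theorem validate_communication_code_spec : Claim_equal_validate_communication_code := by
  intro code _
  unfold Spec_validate_communication_code
  rw [Bool.eq_iff_iff, A_iff, B_iff]
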